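-- pv_equiv track=rewrite | github.com/sp9028/P1 | Predavanja 12 Specops/Specops.py | koraki
-- ===== SOURCE A (Python) =====
-- def koraki(x, y, pot):
--     seznam = []
--     seznam.append((x,y))
--     for i in pot:
--         if i == '>':
--             x += 1
--             seznam.append((x, y))
--         elif i == '^':
--             y -= 1
--             seznam.append((x, y))
--         elif i == 'v':
--             y += 1
--             seznam.append((x, y))
--         elif i == '<':
--             x -= 1
--             seznam.append((x, y))
--     return seznam
-- ===== SOURCE B (Python) =====
-- def koraki(x, y, pot):
--     moves = [c for c in pot if c in '><^v']
--     xs = [x]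
--     for c in moves:
--         xs.append(xs[-1] + (c == '>') - (c == '<'))
--     ys = [y]
--     for c in moves:
--         ys.append(ys[-1] + (c == 'v') - (c == '^'))
--     return list(zip(xs, ys))
-- ===== Notes on version B (the rewrite author's own statement) =====
-- stated objective: alternative
-- what changed: Instead of one loop accumulating 2-D points, B filters the moves once and then computes the x-coordinate trace and the y-coordinate trace as two independent prefix-sum passes, finally zipping them into the list of points.
import Mathlib
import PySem

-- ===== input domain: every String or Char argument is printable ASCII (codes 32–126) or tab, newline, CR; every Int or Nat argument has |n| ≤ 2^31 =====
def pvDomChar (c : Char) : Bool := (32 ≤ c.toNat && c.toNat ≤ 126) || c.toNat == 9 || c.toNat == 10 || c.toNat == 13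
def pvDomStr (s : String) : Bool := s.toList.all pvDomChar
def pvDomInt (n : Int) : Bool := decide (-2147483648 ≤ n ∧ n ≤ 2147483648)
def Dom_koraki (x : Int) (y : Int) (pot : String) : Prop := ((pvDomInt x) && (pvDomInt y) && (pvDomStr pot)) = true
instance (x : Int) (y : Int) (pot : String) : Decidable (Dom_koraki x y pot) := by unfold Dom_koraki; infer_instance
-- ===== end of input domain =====

-- B computes the x- and y-coordinate traces as two independent prefix-sum passes over the filtered moves and zips them (alternative decomposition, same cost).


-- ===== PORT A =====
-- Literal port of A: one fold over the characters carrying (x, y, seznam);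
-- each recognized direction mutates a coordinate and appends the new point.
def korakiStep (st : Int × Int × List (Int × Int)) (i : Char) : Int × Int × List (Int × Int) :=
  let x := st.1
  let y := st.2.1
  let sez := st.2.2
  if i = '>' then (x + 1, y, sez ++ [(x + 1, y)])
  else if i = '^' then (x, y - 1, sez ++ [(x, y - 1)])
  else if i = 'v' then (x, y + 1, sez ++ [(x, y + 1)])
  else if i = '<' then (x - 1, y, sez ++ [(x - 1, y)])
  else (x, y, sez)

def koraki (x : Int) (y : Int) (pot : String) : List (Int × Int) :=
  (pot.toList.foldl korakiStep (x, y, [(x, y)])).2.2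

-- ===== PORT B =====
-- Port of B: filter the moves, then build the x-trace and the y-trace by two
-- independent prefix-sum loops (each appends last + delta), and zip them.
-- (c == '>') - (c == '<') as an Int, and its y analogue:
def korakiDx (c : Char) : Int := (if c = '>' then 1 else 0) - (if c = '<' then 1 else 0)
def korakiDy (c : Char) : Int := (if c = 'v' then 1 else 0) - (if c = '^' then 1 else 0)

-- xs.append(xs[-1] + d); the list starts nonempty, so the getD default is never used.
def korakiExtend (d : Char → Int) (l : List Int) (c : Char) : List Int :=
  l ++ [l.getLast?.getD 0 + d c]

def korakiMoves (pot : String) : List Char :=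
  pot.toList.filter (fun c => "><^v".toList.contains c)

def koraki_alt (x : Int) (y : Int) (pot : String) : List (Int × Int) :=
  ((korakiMoves pot).foldl (korakiExtend korakiDx) [x]).zip
    ((korakiMoves pot).foldl (korakiExtend korakiDy) [y])

-- ===== PRECONDITION & SPEC =====
def Spec_koraki (x : Int) (y : Int) (pot : String) (out : List (Int × Int)) : Prop := out = koraki_alt x y pot
instance (x : Int) (y : Int) (pot : String) (out : List (Int × Int)) : Decidable (Spec_koraki x y pot out) := by unfold Spec_koraki; infer_instance

-- ===== CLAIM (what is proved, stated in full; the proofs are below) =====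
def Claim_equal_koraki : Prop := ∀ (x : Int) (y : Int) (pot : String), Dom_koraki x y pot → Spec_koraki x y pot (koraki x y pot)

-- ===== LEMMAS AND PROOFS =====

-- the abstract trace of points both programs compute
def korakiTrace : Int → Int → List Char → List (Int × Int)
  | x, y, [] => [(x, y)]
  | x, y, c :: cs => (x, y) :: korakiTrace (x + korakiDx c) (y + korakiDy c) cs

-- the abstract trace of one coordinate
def korakiTrace1 (d : Char → Int) : Int → List Char → List Int
  | x, [] => [x]
  | x, c :: cs => x :: korakiTrace1 d (x + d c) cs

lemma dropLast_concat_getLast? {α : Type} : ∀ (l : List α) (a : α),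
    l.getLast? = some a → l.dropLast ++ [a] = l
  | [], _, h => by simp at h
  | [_], _, h => by simp_all
  | b :: c :: t, a, h => by
    have := dropLast_concat_getLast? (c :: t) a (by simpa using h)
    simpa using this

lemma append_cons_getLast? {α : Type} (l : List α) (a : α) (t : List α)
    (h : l.getLast? = some a) : l.dropLast ++ a :: t = l ++ t := by
  rw [show l.dropLast ++ a :: t = (l.dropLast ++ [a]) ++ t from by simp,
    dropLast_concat_getLast? _ _ h]

lemma koraki_A_trace (cs : List Char) : ∀ (x y : Int) (sez : List (Int × Int)),
    sez.getLast? = some (x, y) →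
    (cs.foldl korakiStep (x, y, sez)).2.2
      = sez.dropLast ++ korakiTrace x y (cs.filter (fun c => "><^v".toList.contains c)) := by
  induction cs with
  | nil => intro x y sez h; simp [korakiTrace, dropLast_concat_getLast? _ _ h]
  | cons c cs ih =>
    intro x y sez hlast
    rw [List.foldl_cons, List.filter_cons]
    by_cases h1 : c = '>'
    · subst h1
      rw [show korakiStep (x, y, sez) '>' = (x + 1, y, sez ++ [(x + 1, y)]) from by
        simp [korakiStep]]
      rw [ih (x + 1) y _ (by simp)]
      simp [korakiTrace, korakiDx, korakiDy, append_cons_getLast? _ _ _ hlast]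
    · by_cases h2 : c = '^'
      · subst h2
        rw [show korakiStep (x, y, sez) '^' = (x, y - 1, sez ++ [(x, y - 1)]) from by
          simp [korakiStep]]
        rw [ih x (y - 1) _ (by simp)]
        simp [korakiTrace, korakiDx, korakiDy, sub_eq_add_neg,
          append_cons_getLast? _ _ _ hlast]
      · by_cases h3 : c = 'v'
        · subst h3
          rw [show korakiStep (x, y, sez) 'v' = (x, y + 1, sez ++ [(x, y + 1)]) from by
            simp [korakiStep]]
          rw [ih x (y + 1) _ (by simp)]
          simp [korakiTrace, korakiDx, korakiDy, append_cons_getLast? _ _ _ hlast]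
        · by_cases h4 : c = '<'
          · subst h4
            rw [show korakiStep (x, y, sez) '<' = (x - 1, y, sez ++ [(x - 1, y)]) from by
              simp [korakiStep]]
            rw [ih (x - 1) y _ (by simp)]
            simp [korakiTrace, korakiDx, korakiDy, sub_eq_add_neg,
              append_cons_getLast? _ _ _ hlast]
          · rw [show korakiStep (x, y, sez) c = (x, y, sez) from by
              simp [korakiStep, h1, h2, h3, h4]]
            rw [ih x y sez hlast]
            simp [h1, h2, h3, h4]

lemma koraki_B_trace1 (d : Char → Int) (ms : List Char) : ∀ (x : Int) (l : List Int),
    l.getLast? = some x →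
    ms.foldl (korakiExtend d) l = l.dropLast ++ korakiTrace1 d x ms := by
  induction ms with
  | nil => intro x l h; simp [korakiTrace1, dropLast_concat_getLast? _ _ h]
  | cons c cs ih =>
    intro x l hlast
    simp only [List.foldl_cons, korakiExtend, hlast, Option.getD_some]
    rw [ih (x + d c) _ (by simp)]
    rw [show l.dropLast ++ korakiTrace1 d x (c :: cs)
        = (l.dropLast ++ [x]) ++ korakiTrace1 d (x + d c) cs from by simp [korakiTrace1]]
    rw [dropLast_concat_getLast? _ _ hlast]
    simp

lemma koraki_zip_trace (ms : List Char) : ∀ (x y : Int),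
    (korakiTrace1 korakiDx x ms).zip (korakiTrace1 korakiDy y ms) = korakiTrace x y ms := by
  induction ms with
  | nil => intro x y; simp [korakiTrace1, korakiTrace]
  | cons c cs ih => intro x y; simp [korakiTrace1, korakiTrace, ih]

-- ===== VERDICT (by name: the statement is the Claim_ definition above) =====
theorem koraki_spec : Claim_equal_koraki := by
  intro x y pot _
  unfold Spec_koraki koraki koraki_alt korakiMoves
  rw [koraki_A_trace pot.toList x y [(x, y)] (by simp),
    koraki_B_trace1 korakiDx _ x [x] (by simp),
    koraki_B_trace1 korakiDy _ y [y] (by simp)]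
  simp [koraki_zip_trace]
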